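-- pv_equiv track=rewrite | github.com/benquick123/code-profiling | code/batch-1/vse-naloge-brez-testov/DN6-M-159.py | omembe
-- ===== SOURCE A (Python) =====
-- import collections
--
-- def unikati(s):
--     seznam = []
--     for i in s:
--         if i not in seznam:
--             seznam.append(i)
--     return seznam
--
-- def se_zacne_z(tvit, c):
--     beseda = ""
--     seznam = []
--     pisi = False
--     for z in tvit:
--         if c == z:
--             pisi = True
--             continue
--         if pisi and z.isalnum():
--             beseda = beseda + z
--         elif pisi:
--             seznam.append(beseda)
--             pisi = False
--             beseda = ""
--     if beseda != "":
--         seznam.append(beseda)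
--
--     return seznam
--
-- def split_tvit(tvit):
--     return tvit.split(": ", 1)
--
-- def get_key(tvit):
--     return split_tvit(tvit)[0]
--
-- def get_afne(tvit): ##afne iz enega tvita
--     return se_zacne_z(tvit, "@")
--
-- def omembe(tviti):
--     omembice = collections.defaultdict(list)
--     for tvit in tviti:
--         key = get_key(tvit)
--         # za trenutni tvit pridobi vse ozna훾be (afne) v seznam
--         afne = get_afne(tvit)
--         # seznam omenjenih besed (unikati)
--         omembice[key].extend(afne)
--         omembice[key] = unikati(omembice[key])
--     return omembice
-- ===== SOURCE B (Python) =====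
-- import collections
--
-- def se_zacne_z(tvit, c):
--     beseda = ""
--     seznam = []
--     pisi = False
--     for z in tvit:
--         if c == z:
--             pisi = True
--             continue
--         if pisi and z.isalnum():
--             beseda = beseda + z
--         elif pisi:
--             seznam.append(beseda)
--             pisi = False
--             beseda = ""
--     if beseda != "":
--         seznam.append(beseda)
--     return seznam
--
-- def omembe(tviti):
--     # pass 1: group ALL mentions per key (no dedup yet)
--     raw = collections.defaultdict(list)
--     for tvit in tviti:
--         key = tvit.split(": ", 1)[0]
--         raw[key].extend(se_zacne_z(tvit, "@"))
--     # pass 2: one linear seen-set dedup per key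
--     omembice = collections.defaultdict(list)
--     for key, vals in raw.items():
--         seen = set()
--         uniq = []
--         for v in vals:
--             if v not in seen:
--                 seen.add(v)
--                 uniq.append(v)
--         omembice[key] = uniq
--     return omembice
-- ===== Notes on version B (the rewrite author's own statement) =====
-- stated objective: alternative
-- what changed: B first groups all mentions per key in one pass, then dedups each key's list once with a hash seen-set, instead of A's re-running the membership-scan dedup on the whole per-key list after every tweet.
import Mathlib
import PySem

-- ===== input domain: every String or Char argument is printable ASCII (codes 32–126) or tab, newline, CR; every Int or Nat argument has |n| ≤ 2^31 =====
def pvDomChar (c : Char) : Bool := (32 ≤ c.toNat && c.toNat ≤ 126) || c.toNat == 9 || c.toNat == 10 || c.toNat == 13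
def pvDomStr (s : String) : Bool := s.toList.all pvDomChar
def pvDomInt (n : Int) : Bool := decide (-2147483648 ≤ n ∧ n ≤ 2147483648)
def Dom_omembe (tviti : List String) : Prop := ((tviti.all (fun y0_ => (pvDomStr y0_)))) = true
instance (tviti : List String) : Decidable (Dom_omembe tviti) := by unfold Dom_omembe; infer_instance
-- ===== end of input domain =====

-- B regroups: pass 1 collects all mentions per key, pass 2 dedups each key's list once with a
-- seen-set, replacing A's re-dedup of the growing per-key list on every tweet (objective: alternative).


-- ===== PORT A =====
-- unikati: ordered first-occurrence dedup, exactly A's membership-scan loop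
def unikati (s : List String) : List String :=
  s.foldl (fun seznam i => if i ∈ seznam then seznam else seznam ++ [i]) []

-- se_zacne_z: A's flag state machine over the characters; beseda kept as List Char
-- (Python string concatenation beseda + z ported as list append; String.ofList at emission)
def seZacneZ (tvit : String) (c : Char) : List String :=
  let st := tvit.toList.foldl
    (fun (st : List Char × List String × Bool) z =>
      if c == z then (st.1, st.2.1, true)
      else if st.2.2 && PySem.Chars.isalnum z then (st.1 ++ [z], st.2.1, st.2.2)
      else if st.2.2 then ([], st.2.1 ++ [String.ofList st.1], false)
      else st)
    ([], [], false)
  if st.1 ≠ [] then st.2.1 ++ [String.ofList st.1] else st.2.1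

-- get_key: tvit.split(": ", 1)[0]; the split list is always nonempty, sep ≠ "" so splitMax? is some
def getKey (tvit : String) : String :=
  (((PySem.Str.splitMax? tvit ": " 1).getD []).headD "")

def getAfne (tvit : String) : List String := seZacneZ tvit '@'

def omembe (tviti : List String) : List (String × List String) :=
  (tviti.foldl
    (fun (d : PySem.Dict String (List String)) tvit =>
      d.insert (getKey tvit) (unikati (d.getD (getKey tvit) [] ++ getAfne tvit)))
    PySem.Dict.empty).items

-- ===== PORT B =====
-- seen-set linear dedup (B's pass 2 inner loop)
def sdedup (vals : List String) : List String :=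
  (vals.foldl
    (fun (st : PySem.Set String × List String) v =>
      if st.1.contains v then st else (st.1.add v, st.2 ++ [v]))
    (PySem.Set.empty, [])).2

-- B's pass 1: raw grouped mentions per key
def rawOmembe (tviti : List String) : PySem.Dict String (List String) :=
  tviti.foldl
    (fun (d : PySem.Dict String (List String)) tvit =>
      d.insert (getKey tvit) (d.getD (getKey tvit) [] ++ getAfne tvit))
    PySem.Dict.empty

def omembe_alt (tviti : List String) : List (String × List String) :=
  ((rawOmembe tviti).items.foldl
    (fun (d : PySem.Dict String (List String)) kv => d.insert kv.1 (sdedup kv.2))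
    PySem.Dict.empty).items

-- ===== PRECONDITION & SPEC =====
def Spec_omembe (tviti : List String) (out : List (String × List String)) : Prop := out = omembe_alt tviti
instance (tviti : List String) (out : List (String × List String)) : Decidable (Spec_omembe tviti out) := by unfold Spec_omembe; infer_instance

-- ===== CLAIM (what is proved, stated in full; the proofs are below) =====
def Claim_equal_omembe : Prop := ∀ (tviti : List String), Dom_omembe tviti → Spec_omembe tviti (omembe tviti)

-- ===== LEMMAS AND PROOFS =====

theorem nodup_unikati_foldl (l : List String) : ∀ (acc : List String), acc.Nodup →
    (l.foldl (fun seznam i => if i ∈ seznam then seznam else seznam ++ [i]) acc).Nodup := by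
  induction l with
  | nil => intro acc h; simpa using h
  | cons x t ih =>
    intro acc h
    simp only [List.foldl_cons]
    by_cases hx : x ∈ acc
    · simp [hx, ih acc h]
    · rw [if_neg hx]
      exact ih _ (by
        simp only [List.nodup_append, List.nodup_singleton, true_and]
        exact ⟨h, by simpa using fun a ha hax => hx (by rw [← hax]; exact ha)⟩)

theorem unikati_foldl_of_nodup (l : List String) : ∀ (acc : List String), l.Nodup →
    (∀ x ∈ l, x ∉ acc) →
    l.foldl (fun seznam i => if i ∈ seznam then seznam else seznam ++ [i]) acc = acc ++ l := by
  induction l with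
  | nil => intro acc _ _; simp
  | cons x t ih =>
    intro acc hnd hdis
    have hx : x ∉ acc := hdis x (by simp)
    simp only [List.foldl_cons, hx, if_neg, not_false_iff]
    have := ih (acc ++ [x]) (by simp at hnd; exact hnd.2)
      (by intro y hy; simp at hnd ⊢
          exact ⟨hdis y (by simp [hy]), fun h => hnd.1 (h ▸ hy)⟩)
    simpa using this

theorem unikati_idem (v : List String) : unikati (unikati v) = unikati v := by
  have hnd : (unikati v).Nodup := nodup_unikati_foldl v [] List.nodup_nil
  have := unikati_foldl_of_nodup (unikati v) [] hnd (by simp)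
  simpa [unikati] using this

theorem unikati_unikati_append (v a : List String) :
    unikati (unikati v ++ a) = unikati (v ++ a) := by
  simp only [unikati, List.foldl_append]
  have h1 : (unikati v).foldl (fun seznam i => if i ∈ seznam then seznam else seznam ++ [i]) []
      = unikati v := by
    simpa [unikati] using unikati_idem v
  simp only [unikati] at h1
  rw [h1]

theorem sdedup_aux (l : List String) : ∀ (seen : PySem.Set String) (out : List String),
    (∀ x, x ∈ seen ↔ x ∈ out) →
    (l.foldl (fun (st : PySem.Set String × List String) v =>
        if st.1.contains v then st else (st.1.add v, st.2 ++ [v])) (seen, out)).2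
    = l.foldl (fun seznam i => if i ∈ seznam then seznam else seznam ++ [i]) out := by
  induction l with
  | nil => intro seen out _; simp
  | cons v t ih =>
    intro seen out hinv
    simp only [List.foldl_cons]
    by_cases hv : v ∈ out
    · have hc : seen.contains v = true := by
        simp [PySem.Set.contains, (hinv v).2 hv]
      rw [if_pos hc, if_pos hv]
      exact ih seen out hinv
    · have hc : ¬ seen.contains v = true := by
        simp only [PySem.Set.contains, List.contains_iff_mem]
        exact fun h => hv ((hinv v).1 h)
      rw [if_neg hc, if_neg hv]
      exact ih _ _ (by
        intro x
        rw [PySem.Set.mem_add]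
        simp [hinv x, or_comm])

theorem sdedup_eq_unikati (l : List String) : sdedup l = unikati l := by
  have := sdedup_aux l PySem.Set.empty [] (by simp [PySem.Set.empty])
  simpa [sdedup, unikati] using this

-- mapU: apply unikati to every value of a dict, keys and order untouched
def mapU (d : PySem.Dict String (List String)) : PySem.Dict String (List String) :=
  PySem.Dict.mk (d.items.map (fun p => (p.1, unikati p.2)))

theorem contains_mapU (d : PySem.Dict String (List String)) (k : String) :
    (mapU d).contains k = d.contains k := by
  simp [mapU, PySem.Dict.contains]
  induction d.items with
  | nil => simp
  | cons p t ih => simp [ih]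

theorem get?_mapU (d : PySem.Dict String (List String)) (k : String) :
    (mapU d).get? k = (d.get? k).map unikati := by
  simp only [mapU, PySem.Dict.get?]
  induction d.items with
  | nil => simp
  | cons p t ih =>
    by_cases hk : p.1 == k
    · simp [List.find?, hk]
    · simp only [List.map_cons, List.find?]
      simp only [hk]
      exact ih

theorem getD_mapU (d : PySem.Dict String (List String)) (k : String) :
    (mapU d).getD k [] = unikati (d.getD k []) := by
  rw [PySem.Dict.getD_eq_get?_getD, PySem.Dict.getD_eq_get?_getD, get?_mapU]
  cases d.get? k with
  | none => simp [unikati]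
  | some v => simp

theorem mapU_insert (d : PySem.Dict String (List String)) (k : String) (v : List String) :
    mapU (d.insert k v) = (mapU d).insert k (unikati v) := by
  have hcm : (mapU d).contains k = d.contains k := contains_mapU d k
  cases hc : d.contains k with
  | false =>
    rw [hc] at hcm
    simp only [PySem.Dict.insert, hc, hcm, Bool.false_eq_true, if_false]
    simp [mapU]
  | true =>
    rw [hc] at hcm
    simp only [PySem.Dict.insert, hc, hcm, if_true]
    simp only [mapU, List.map_map]
    congr 1
    apply List.map_congr_left
    intro p _
    by_cases hk : (p.1 == k) = true
    · simp only [Function.comp]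
      simp at hk
      simp [hk]
    · simp only [Function.comp]
      simp at hk
      simp [hk]

theorem omembe_fold_eq (tviti : List String) :
    ∀ (dR : PySem.Dict String (List String)),
    tviti.foldl
      (fun (d : PySem.Dict String (List String)) tvit =>
        d.insert (getKey tvit) (unikati (d.getD (getKey tvit) [] ++ getAfne tvit)))
      (mapU dR)
    = mapU (tviti.foldl
      (fun (d : PySem.Dict String (List String)) tvit =>
        d.insert (getKey tvit) (d.getD (getKey tvit) [] ++ getAfne tvit)) dR) := by
  induction tviti with
  | nil => intro dR; simp
  | cons tvit t ih =>
    intro dR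
    simp only [List.foldl_cons]
    rw [getD_mapU, unikati_unikati_append, ← mapU_insert, ih]

-- ===== VERDICT (by name: the statement is the Claim_ definition above) =====
theorem omembe_spec : Claim_equal_omembe := by
  intro tviti _
  unfold Spec_omembe omembe omembe_alt
  have hempty : (mapU PySem.Dict.empty) = (PySem.Dict.empty : PySem.Dict String (List String)) := by
    simp [mapU, PySem.Dict.empty]
  have hA := omembe_fold_eq tviti PySem.Dict.empty
  rw [hempty] at hA
  rw [hA]
  have hnd : (rawOmembe tviti).keys.Nodup := by
    unfold rawOmembe
    exact PySem.Dict.nodup_keys_foldl_insert_key tviti getKey _ _ (by simp)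
  have hfresh := PySem.Dict.items_foldl_insert_fresh (rawOmembe tviti).items Prod.fst
      (fun kv => sdedup kv.2) (PySem.Dict.empty : PySem.Dict String (List String))
      (by intro a _; simp) (by simpa [PySem.Dict.keys] using hnd)
  simp only at hfresh
  unfold rawOmembe at hfresh ⊢
  rw [hfresh]
  simp [mapU, PySem.Dict.empty, sdedup_eq_unikati]
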